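-- pv_equiv track=rewrite | github.com/mcdehaan/adventOfCode | 2023/day1/logic/number_word_logic.py | replace_last_word_with_number
-- ===== SOURCE A (Python) =====
-- words_numbers = {
--     "one": "1", "two": "2", "three": "3",
--     "four": "4", "five": "5", "six": "6",
--     "seven": "7", "eight": "8", "nine": "9"
-- }
--
-- def replace_last_word_with_number(input_line):
--     last_match = None
--     last_match_index = -1
--
--     # Iterate through the string to find the last occurrence of any number word
--     for i in range(len(input_line)):
--         for word in words_numbers.keys():
--             if input_line.startswith(word, i):
--                 last_match = word
--                 last_match_index = i
--
--     # If a match was found, replace the last occurrence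
--     if last_match is not None:
--         number = words_numbers[last_match]
--         before = input_line[:last_match_index]
--         after = input_line[last_match_index + len(last_match):]
--         result_line = before + number + after
--     else:
--         result_line = input_line
--
--     return result_line
-- ===== SOURCE B (Python) =====
-- words_numbers = {
--     "one": "1", "two": "2", "three": "3",
--     "four": "4", "five": "5", "six": "6",
--     "seven": "7", "eight": "8", "nine": "9"
-- }
--
-- def replace_last_word_with_number(input_line):
--     # Scan backwards from the end; the first position with a match is the last
--     # occurrence, so we can build the result and return immediately.
--     for i in reversed(range(len(input_line))):
--         for word, digit in words_numbers.items():
--             if input_line.startswith(word, i):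
--                 return input_line[:i] + digit + input_line[i + len(word):]
--     return input_line
-- ===== Notes on version B (the rewrite author's own statement) =====
-- stated objective: alternative
-- what changed: A scans every position left-to-right, tracking the last matching word in state and rebuilding via a dict lookup afterwards; B scans backwards from the end and returns the rebuilt string at the first match it finds (which is the last occurrence), relying on the fact that no number word is a prefix of another.
import Mathlib
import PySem

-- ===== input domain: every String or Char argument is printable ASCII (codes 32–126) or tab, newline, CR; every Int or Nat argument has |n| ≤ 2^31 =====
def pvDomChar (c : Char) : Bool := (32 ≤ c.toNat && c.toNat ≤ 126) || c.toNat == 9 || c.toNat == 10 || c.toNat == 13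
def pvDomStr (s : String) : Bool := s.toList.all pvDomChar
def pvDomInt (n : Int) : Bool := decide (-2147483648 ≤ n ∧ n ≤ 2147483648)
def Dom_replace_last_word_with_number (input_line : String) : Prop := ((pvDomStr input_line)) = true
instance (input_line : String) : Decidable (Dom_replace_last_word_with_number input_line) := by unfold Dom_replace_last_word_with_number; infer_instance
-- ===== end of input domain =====

-- B replaces A's forward scan that tracks the last match with a backward scan that
-- returns at the first match (= the last occurrence); objective: alternative.

-- the module-level dict words_numbers, as an association list in insertion order
def wordsNumbers : List (List Char × List Char) :=
  [ (['o','n','e'], ['1']), (['t','w','o'], ['2']), (['t','h','r','e','e'], ['3']),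
    (['f','o','u','r'], ['4']), (['f','i','v','e'], ['5']), (['s','i','x'], ['6']),
    (['s','e','v','e','n'], ['7']), (['e','i','g','h','t'], ['8']), (['n','i','n','e'], ['9']) ]

-- input_line.startswith(word, i): word is a prefix of input_line[i:] (exact for the 0 ≤ i used here)
def startswithFrom (cs w : List Char) (i : Int) : Bool :=
  PySem.Chars.startswith (PySem.List.slice cs (some i) none) w

-- ===== PORT A =====
def replace_last_word_with_number (input_line : String) : String :=
  let cs := input_line.toList
  -- for i in range(len(input_line)): for word in words_numbers.keys(): if startswith: update
  let st := (PySem.List.pyRange 0 (cs.length : Int) 1).foldl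
    (fun st i => wordsNumbers.foldl
      (fun st2 wd => if startswithFrom cs wd.1 i then (some wd.1, i) else st2) st)
    ((none : Option (List Char)), (-1 : Int))
  match st.1 with
  | some w =>
    -- words_numbers[last_match]: the key is always a dict key, so KeyError is unreachable
    let number := (PySem.Dict.get? ⟨wordsNumbers⟩ w).getD []
    let before := PySem.List.slice cs none (some st.2)
    let after := PySem.List.slice cs (some (st.2 + (w.length : Int))) none
    String.ofList (before ++ number ++ after)
  | none => input_line

-- ===== PORT B =====
-- the inner 'for word, digit in words_numbers.items(): … return …' loop
def tryWordsB (cs : List Char) (i : Int) : List (List Char × List Char) → Option (List Char)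
  | [] => none
  | wd :: rest =>
    if startswithFrom cs wd.1 i then
      some (PySem.List.slice cs none (some i) ++ wd.2 ++
            PySem.List.slice cs (some (i + (wd.1.length : Int))) none)
    else tryWordsB cs i rest

-- the outer 'for i in reversed(range(len(input_line)))' loop with its early returns
def goB (cs : List Char) : List Int → List Char
  | [] => cs
  | i :: rest =>
    match tryWordsB cs i wordsNumbers with
    | some out => out
    | none => goB cs rest

def replace_last_word_with_number_alt (input_line : String) : String :=
  let cs := input_line.toList
  String.ofList (goB cs ((PySem.List.pyRange 0 (cs.length : Int) 1).reverse))

-- ===== PRECONDITION & SPEC =====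
def Spec_replace_last_word_with_number (input_line : String) (out : String) : Prop := out = replace_last_word_with_number_alt input_line
instance (input_line : String) (out : String) : Decidable (Spec_replace_last_word_with_number input_line out) := by unfold Spec_replace_last_word_with_number; infer_instance

-- ===== CLAIM (what is proved, stated in full; the proofs are below) =====
def Claim_equal_replace_last_word_with_number : Prop := ∀ (input_line : String), Dom_replace_last_word_with_number input_line → Spec_replace_last_word_with_number input_line (replace_last_word_with_number input_line)

-- ===== LEMMAS AND PROOFS =====

-- the first (word, digit) pair matching at position i (at most one can match)
def fmatch (cs : List Char) (i : Int) : Option (List Char × List Char) :=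
  wordsNumbers.find? (fun wd => startswithFrom cs wd.1 i)

-- A's state once some position ≤ i matched, phrased as a function of i alone
def gA (cs : List Char) (i : Int) : Option (List Char) × Int :=
  match fmatch cs i with
  | some wd => (some wd.1, i)
  | none => (none, -1)

-- no dict key is a proper prefix of another
lemma keys_mutex : ∀ a ∈ wordsNumbers, ∀ b ∈ wordsNumbers,
    PySem.Chars.startswith b.1 a.1 = true → a = b := by decide

lemma lookup_key : ∀ wd ∈ wordsNumbers,
    (PySem.Dict.get? ⟨wordsNumbers⟩ wd.1).getD [] = wd.2 := by decide

-- at a fixed position, no two distinct words can both match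
lemma mutex (cs : List Char) (i : Int) :
    wordsNumbers.Pairwise
      (fun a b => ¬(startswithFrom cs a.1 i = true ∧ startswithFrom cs b.1 i = true)) := by
  have hnd : wordsNumbers.Nodup := by decide
  refine List.Pairwise.imp_of_mem (fun {a b} ha hb hne => ?_) hnd
  rintro ⟨h1, h2⟩
  rw [startswithFrom, PySem.Chars.startswith_iff] at h1 h2
  rcases List.prefix_or_prefix_of_prefix h1 h2 with h | h
  · exact hne (keys_mutex a ha b hb ((PySem.Chars.startswith_iff _ _).mpr h))
  · exact hne ((keys_mutex b hb a ha ((PySem.Chars.startswith_iff _ _).mpr h)).symm)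

lemma foldl_no_match {α β : Type} (l : List α) (c : α → Bool) (g : α → β) (st : β)
    (h : ∀ x ∈ l, c x = false) :
    l.foldl (fun s x => if c x then g x else s) st = st := by
  induction l generalizing st with
  | nil => rfl
  | cons x l ih =>
    simp only [List.foldl_cons, h x (by simp)]
    exact ih st (fun y hy => h y (by simp [hy]))

-- A's inner loop keeps the last matching word; with mutex that is the first (unique) one
lemma inner_fold (cs : List Char) (i : Int) (l : List (List Char × List Char))
    (st : Option (List Char) × Int)
    (hp : l.Pairwise
      (fun a b => ¬(startswithFrom cs a.1 i = true ∧ startswithFrom cs b.1 i = true))) :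
    l.foldl (fun st2 wd => if startswithFrom cs wd.1 i then (some wd.1, i) else st2) st
      = match l.find? (fun wd => startswithFrom cs wd.1 i) with
        | some wd => (some wd.1, i)
        | none => st := by
  induction l generalizing st with
  | nil => rfl
  | cons wd l ih =>
    rcases List.pairwise_cons.mp hp with ⟨hhead, htail⟩
    by_cases hc : startswithFrom cs wd.1 i = true
    · have hall : ∀ x ∈ l, startswithFrom cs x.1 i = false := by
        intro x hx
        by_contra hx'
        exact hhead x hx ⟨hc, by simpa using hx'⟩
      simp [List.foldl_cons, hc,
        foldl_no_match l (fun wd => startswithFrom cs wd.1 i) (fun wd => (some wd.1, i)) _ hall]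
    · simp [List.foldl_cons, hc, ih st htail]

-- a fold that keeps the last index satisfying q equals find? over the reversed list
lemma outer_fold {β : Type} (L : List Int) (q : Int → Bool) (g : Int → β) (st : β) :
    L.foldl (fun s i => if q i then g i else s) st
      = match L.reverse.find? q with
        | some i => g i
        | none => st := by
  induction L generalizing st with
  | nil => rfl
  | cons i L ih =>
    simp only [List.foldl_cons, ih, List.reverse_cons, List.find?_append]
    cases h : L.reverse.find? q with
    | some j => simp [Option.or]
    | none => cases hq : q i <;> simp [hq, Option.or, List.find?]

lemma tryWords_eq (cs : List Char) (i : Int) (l : List (List Char × List Char)) :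
    tryWordsB cs i l = (l.find? (fun wd => startswithFrom cs wd.1 i)).map
      (fun wd => PySem.List.slice cs none (some i) ++ wd.2 ++
                 PySem.List.slice cs (some (i + (wd.1.length : Int))) none) := by
  induction l with
  | nil => rfl
  | cons wd l ih =>
    by_cases hc : startswithFrom cs wd.1 i = true <;>
      simp [tryWordsB, hc, ih]

lemma goB_eq (cs : List Char) (M : List Int) :
    goB cs M = match M.find? (fun i => (fmatch cs i).isSome) with
      | some i =>
        match fmatch cs i with
        | some wd => PySem.List.slice cs none (some i) ++ wd.2 ++
                     PySem.List.slice cs (some (i + (wd.1.length : Int))) none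
        | none => cs
      | none => cs := by
  induction M with
  | nil => rfl
  | cons i M ih =>
    show (match tryWordsB cs i wordsNumbers with
          | some out => out
          | none => goB cs M) = _
    rw [tryWords_eq]
    have hfm : List.find? (fun wd => startswithFrom cs wd.1 i) wordsNumbers = fmatch cs i := rfl
    rw [hfm]
    cases h : fmatch cs i with
    | some wd => simp [h]
    | none => simp [h, ih]

-- ===== VERDICT (by name: the statement is the Claim_ definition above) =====
theorem replace_last_word_with_number_spec : Claim_equal_replace_last_word_with_number := by
  intro s _
  unfold Spec_replace_last_word_with_number
  show replace_last_word_with_number s = replace_last_word_with_number_alt s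
  unfold replace_last_word_with_number replace_last_word_with_number_alt
  set cs := s.toList with hcs
  -- rewrite A's loop body into the guarded form, then apply outer_fold
  have hstep : (fun (st : Option (List Char) × Int) (i : Int) => wordsNumbers.foldl
      (fun st2 wd => if startswithFrom cs wd.1 i then (some wd.1, i) else st2) st)
      = fun st i => if (fmatch cs i).isSome then gA cs i else st := by
    funext st i
    rw [inner_fold cs i wordsNumbers st (mutex cs i)]
    unfold gA fmatch
    cases h : wordsNumbers.find? (fun wd => startswithFrom cs wd.1 i) <;> simp
  simp only [hstep, outer_fold, goB_eq]
  cases hf : (PySem.List.pyRange 0 (cs.length : Int) 1).reverse.find?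
      (fun i => (fmatch cs i).isSome) with
  | none =>
    exact (String.ofList_toList).symm
  | some i =>
    have hq : (fmatch cs i).isSome = true := by simpa using List.find?_some hf
    cases h : fmatch cs i with
    | none => rw [h] at hq; simp at hq
    | some wd =>
      have hmem : wd ∈ wordsNumbers := List.mem_of_find?_eq_some h
      simp only [h, gA]
      simp [lookup_key wd hmem]
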